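/-
  The named simp sets of the stepping machinery (a simp attribute must be declared in a module imported by the ones
  that use it). Both sets are empty here.

      @[u_step]   the rules that run `Sem.wpUser` of an instruction body up to the next node that needs a decision
                  (UserX/WpSimp.lean, UserX/Step.lean); sequencing by `wpUser_bind_cont`
      @[u_norm]   the normal form of a user state written as a nest of setters over a base state (UserX/Step.lean)
-/
import Lean

/-- Running `Sem.wpUser` of an instruction body, continuation folded (`simp only [u_step]`). -/
register_simp_attr u_step

/-- The normal form of a nest of setters over a `User.State` (`simp only [u_norm]`). -/
register_simp_attr u_norm

/-- `trace.UserX.env`: one line per observation the stepping loop had to stop at (UserX/Tac.lean). -/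
initialize Lean.registerTraceClass `UserX.env
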